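-- pv_equiv track=rewrite | github.com/kongmadai/vless | sudoku.py | is_valid_row
-- ===== SOURCE A (Python) =====
-- def is_valid_row(row):
--     """
--     检查给定行是否包含重复数字。
--
--     参数：
--     - row: 要检查的行。
--
--     返回值：
--     - 如果行有效（不包含重复数字），则返回True；否则返回False。
--     """
--     seen = set()
--     for num in row:
--         if num != 0:
--             if num in seen:
--                 return False
--             seen.add(num)
--     return True
-- ===== SOURCE B (Python) =====
-- def is_valid_row(row):
--     nums = sorted(n for n in row if n != 0)
--     return all(a != b for a, b in zip(nums, nums[1:]))
-- ===== Notes on version B (the rewrite author's own statement) =====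
-- stated objective: alternative
-- what changed: Replaces the incremental seen-set loop with early return by sorting the nonzero entries and scanning for equal adjacent values, so duplicate detection comes from sorted order instead of membership tracking.
import Mathlib
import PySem

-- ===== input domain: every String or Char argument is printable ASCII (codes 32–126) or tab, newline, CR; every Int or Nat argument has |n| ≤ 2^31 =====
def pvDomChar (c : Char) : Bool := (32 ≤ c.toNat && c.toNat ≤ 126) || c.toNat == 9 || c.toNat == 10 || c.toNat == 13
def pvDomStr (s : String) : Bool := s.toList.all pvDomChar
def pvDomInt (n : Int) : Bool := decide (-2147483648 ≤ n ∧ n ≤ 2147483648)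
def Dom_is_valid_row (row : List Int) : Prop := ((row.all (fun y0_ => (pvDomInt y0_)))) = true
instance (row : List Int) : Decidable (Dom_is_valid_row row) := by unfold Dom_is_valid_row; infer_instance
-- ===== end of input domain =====

-- B replaces A's incremental seen-set loop (with early return) by sorting the nonzero
-- entries and checking that no two adjacent sorted values are equal (objective: alternative).


-- ===== PORT A =====
-- loop over the row carrying the 'seen' set, with early return False on a repeat
def isValidRowLoop (xs : List Int) (seen : PySem.Set Int) : Bool :=
  match xs with
  | [] => true
  | n :: rest =>
    if n ≠ 0 then
      if PySem.Set.contains seen n then false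
      else isValidRowLoop rest (PySem.Set.add seen n)
    else isValidRowLoop rest seen

def is_valid_row (row : List Int) : Bool := isValidRowLoop row PySem.Set.empty

-- ===== PORT B =====
-- all(a != b for a, b in zip(nums, nums[1:])) : scan adjacent pairs
def adjAllNe (xs : List Int) : Bool :=
  match xs with
  | a :: b :: rest => (a != b) && adjAllNe (b :: rest)
  | _ => true

def is_valid_row_alt (row : List Int) : Bool :=
  let nums := PySem.List.sorted (row.filter (fun n => n != 0)) (fun x => x) false
  adjAllNe nums

-- ===== PRECONDITION & SPEC =====
def Spec_is_valid_row (row : List Int) (out : Bool) : Prop := out = is_valid_row_alt row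
instance (row : List Int) (out : Bool) : Decidable (Spec_is_valid_row row out) := by unfold Spec_is_valid_row; infer_instance

-- ===== CLAIM (what is proved, stated in full; the proofs are below) =====
def Claim_equal_is_valid_row : Prop := ∀ (row : List Int), Dom_is_valid_row row → Spec_is_valid_row row (is_valid_row row)

-- ===== LEMMAS AND PROOFS =====

-- A's loop returns true iff the nonzero entries are pairwise distinct and none is already in 'seen'.
theorem loopA_iff (xs : List Int) : ∀ seen : PySem.Set Int,
    isValidRowLoop xs seen = true ↔
      ((xs.filter (fun n => n != 0)).Nodup ∧ ∀ n ∈ xs, n ≠ 0 → n ∉ seen) := by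
  induction xs with
  | nil => intro seen; simp [isValidRowLoop]
  | cons n rest ih =>
    intro seen
    by_cases hn : n = 0
    · subst hn
      simp only [isValidRowLoop]
      rw [if_neg (show ¬((0:Int) ≠ 0) by simp), ih seen]
      simp
    · simp only [isValidRowLoop]
      rw [if_pos hn]
      by_cases hc : seen.contains n = true
      · rw [if_pos hc]
        rw [PySem.Set.contains_iff] at hc
        simp only [Bool.false_eq_true, false_iff]
        rintro ⟨-, h2⟩
        exact h2 n (by simp) hn hc
      · rw [if_neg hc, ih (PySem.Set.add seen n)]
        rw [PySem.Set.contains_iff] at hc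
        constructor
        · rintro ⟨h1, h2⟩
          refine ⟨?_, ?_⟩
          · simp only [List.filter_cons, if_pos (show (n != 0) = true by simpa using hn)]
            refine List.nodup_cons.mpr ⟨?_, h1⟩
            intro hmem
            rcases List.mem_filter.mp hmem with ⟨hmemr, hne⟩
            have := h2 n hmemr hn
            rw [PySem.Set.mem_add] at this
            exact this (Or.inr rfl)
          · intro m hm hm0
            rcases List.mem_cons.mp hm with h | h
            · exact h ▸ hc
            · intro hms
              have := h2 m h hm0
              rw [PySem.Set.mem_add] at this
              exact this (Or.inl hms)
        · rintro ⟨h1, h2⟩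
          simp only [List.filter_cons, if_pos (show (n != 0) = true by simpa using hn)] at h1
          rcases List.nodup_cons.mp h1 with ⟨hnmem, hrest⟩
          refine ⟨hrest, ?_⟩
          intro m hm hm0
          rw [PySem.Set.mem_add]
          push Not
          refine ⟨h2 m (by simp [hm]) hm0, ?_⟩
          rintro rfl
          exact hnmem (List.mem_filter.mpr ⟨hm, by simpa using hm0⟩)

-- the adjacent-pair scan computes IsChain (· ≠ ·)
theorem adjAllNe_iff (xs : List Int) : adjAllNe xs = true ↔ xs.IsChain (· ≠ ·) := by
  match xs with
  | [] => simp [adjAllNe]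
  | [a] => simp [adjAllNe]
  | a :: b :: rest =>
    rw [List.isChain_cons_cons, ← adjAllNe_iff (b :: rest)]
    simp [adjAllNe]

-- pointwise: chain ≤ and chain ≠ give chain <
theorem isChain_lt_of_le_ne (xs : List Int) :
    xs.IsChain (· ≤ ·) → xs.IsChain (· ≠ ·) → xs.IsChain (· < ·) := by
  match xs with
  | [] => intro _ _; exact List.isChain_nil
  | [a] => intro _ _; exact List.isChain_singleton a
  | a :: b :: rest =>
    intro h1 h2
    rw [List.isChain_cons_cons] at h1 h2 ⊢
    exact ⟨lt_of_le_of_ne h1.1 h2.1, isChain_lt_of_le_ne (b :: rest) h1.2 h2.2⟩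

-- on a ≤-sorted list, adjacent distinctness is exactly Nodup
theorem chain_ne_of_sorted_iff_nodup (xs : List Int) (hs : xs.Pairwise (· ≤ ·)) :
    xs.IsChain (· ≠ ·) ↔ xs.Nodup := by
  constructor
  · intro hc
    have hlt : xs.IsChain (· < ·) := isChain_lt_of_le_ne xs hs.isChain hc
    exact (List.isChain_iff_pairwise.mp hlt).imp ne_of_lt
  · intro hn
    exact hn.isChain

-- ===== VERDICT (by name: the statement is the Claim_ definition above) =====
theorem is_valid_row_spec : Claim_equal_is_valid_row := by
  intro row _
  unfold Spec_is_valid_row is_valid_row is_valid_row_alt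
  rw [Bool.eq_iff_iff, loopA_iff, adjAllNe_iff,
      chain_ne_of_sorted_iff_nodup _ (by simpa using PySem.List.sorted_pairwise (row.filter (fun n => n != 0)) (fun x => x))]
  rw [(PySem.List.sorted_perm (row.filter (fun n => n != 0)) (fun x => x) false).nodup_iff]
  simp [PySem.Set.empty]
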